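-- pv_equiv track=rewrite | github.com/Abhiz-git/Python | Built_in_Functions_Defined/Functions.py | Split1
-- ===== SOURCE A (Python) =====
-- def Split1(String):
--
--     lst = []
--     S=""
--     String = String.strip()
--
--     for char in String:
--
--         if char != " ":
--             S = S+char
--
--         elif char == " ":
--             lst.append(S)
--             S=""
--
--     lst.append(S)
--
--     return lst
-- ===== SOURCE B (Python) =====
-- def Split1(String):
--     String = String.strip()
--     lst = []
--     start = 0
--     pos = String.find(" ", start)
--     while pos != -1:
--         lst.append(String[start:pos])
--         start = pos + 1
--         pos = String.find(" ", start)
--     lst.append(String[start:])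
--     return lst
-- ===== Notes on version B (the rewrite author's own statement) =====
-- stated objective: faster
-- what changed: Replaces the per-character buffer-accumulation loop with a delimiter-to-delimiter scan: str.find locates each space and slicing extracts whole tokens at once.
import Mathlib
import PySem

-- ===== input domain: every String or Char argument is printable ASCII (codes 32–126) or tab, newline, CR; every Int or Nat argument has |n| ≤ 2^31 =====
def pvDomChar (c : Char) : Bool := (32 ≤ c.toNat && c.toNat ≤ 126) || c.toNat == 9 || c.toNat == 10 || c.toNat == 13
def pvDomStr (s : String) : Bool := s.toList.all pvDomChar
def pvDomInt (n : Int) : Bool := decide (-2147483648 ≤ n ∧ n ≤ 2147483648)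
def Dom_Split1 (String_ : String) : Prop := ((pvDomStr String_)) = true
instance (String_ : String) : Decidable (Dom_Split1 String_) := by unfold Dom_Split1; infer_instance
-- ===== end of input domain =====

-- B replaces A's per-character buffer accumulation with a find/slice scan that jumps from
-- space to space; same O(n) cost, different decomposition. Proved equal on all inputs.


-- ===== PORT A =====
-- A: strip, then one pass over the characters, growing a buffer S and flushing it at each
-- space.  The buffer is carried as List Char (String.ofList at flush time) because Lean's
-- own String.append is opaque to the kernel; the strings built are the same values.
def Split1 (String_ : String) : List String :=
  let cs := PySem.Chars.strip String_.toList
  let p := cs.foldl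
    (fun (acc : List String × List Char) c =>
      if c ≠ ' ' then (acc.1, acc.2 ++ [c])
      else (acc.1 ++ [String.ofList acc.2], []))
    ([], [])
  p.1 ++ [String.ofList p.2]

-- ===== PORT B =====
-- B: strip, then jump from space to space with find, slicing out whole tokens.
-- start is B's loop variable: a Python int that stays ≥ 0, carried as Nat and cast to Int
-- at each PySem call (same values).
-- fuel only makes the recursion structural: it starts at cs.length + 1 and, by
-- Split1_findFrom_bounds, start grows by at least 1 below cs.length each step, so it is
-- never exhausted (Split1Aux_eq below is proved for any sufficient fuel).
def Split1Aux (fuel : Nat) (cs : List Char) (start : Nat) : List String :=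
  match fuel with
  | 0 => []
  | fuel + 1 =>
    let pos := PySem.Chars.findFrom cs [' '] (start : Int) none
    if pos = -1 then
      [String.ofList (PySem.List.slice cs (some (start : Int)) none)]
    else
      String.ofList (PySem.List.slice cs (some (start : Int)) (some pos)) ::
        Split1Aux fuel cs (pos.toNat + 1)

def Split1_alt (String_ : String) : List String :=
  let cs := PySem.Chars.strip String_.toList
  Split1Aux (cs.length + 1) cs 0

-- ===== PRECONDITION & SPEC =====
def Spec_Split1 (String_ : String) (out : List String) : Prop := out = Split1_alt String_
instance (String_ : String) (out : List String) : Decidable (Spec_Split1 String_ out) := by unfold Spec_Split1; infer_instance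

-- ===== CLAIM (what is proved, stated in full; the proofs are below) =====
def Claim_equal_Split1 : Prop := ∀ (String_ : String), Dom_Split1 String_ → Spec_Split1 String_ (Split1 String_)

-- ===== LEMMAS AND PROOFS =====

-- A found space lies at an index in [start, len).
theorem Split1_findFrom_gt (cs : List Char) (start : Nat) (hk : cs.length < start) :
    PySem.Chars.findFrom cs [' '] (start : Int) none = -1 := by
  simp only [PySem.Chars.findFrom]
  have h0 : ¬ ((start : Int) < 0) := by omega
  rw [if_neg h0]
  rw [if_pos (by exact_mod_cast hk)]

theorem Split1_findFrom_bounds (cs : List Char) (start : Nat)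
    (h : ¬ PySem.Chars.findFrom cs [' '] (start : Int) none = -1) :
    start ≤ (PySem.Chars.findFrom cs [' '] (start : Int) none).toNat ∧
      (PySem.Chars.findFrom cs [' '] (start : Int) none).toNat < cs.length := by
  by_cases hk : start ≤ cs.length
  · rw [PySem.Chars.findFrom_natCast cs [' '] start hk] at h ⊢
    split_ifs at h ⊢ with hf
    · exact absurd rfl h
    · have hr : -1 ≤ PySem.Chars.find (cs.drop start) [' '] := PySem.Chars.neg_one_le_find _ _
      have hr0 : 0 ≤ PySem.Chars.find (cs.drop start) [' '] := by omega
      have hpre := (PySem.Chars.find_spec (s := cs.drop start) (sub := [' ']) hr0).1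
      have hlt : (PySem.Chars.find (cs.drop start) [' ']).toNat < (cs.drop start).length := by
        by_contra hge
        rw [List.drop_eq_nil_of_le (by omega)] at hpre
        simp at hpre
      rw [List.length_drop] at hlt
      omega
  · exact absurd (Split1_findFrom_gt cs start (by omega)) h

-- Reference tokenizer: the tokens of cs given a pending buffer S, splitting at each space.
def tokS (S : List Char) : List Char → List (List Char)
  | [] => [S]
  | c :: rest => if c = ' ' then S :: tokS [] rest else tokS (S ++ [c]) rest

-- A's fold from any state (lst, S) produces lst ++ the reference tokens.
theorem Split1_foldA (cs : List Char) (lst : List String) (S : List Char) :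
    (cs.foldl
        (fun (acc : List String × List Char) c =>
          if c ≠ ' ' then (acc.1, acc.2 ++ [c])
          else (acc.1 ++ [String.ofList acc.2], []))
        (lst, S)).1 ++
      [String.ofList (cs.foldl
        (fun (acc : List String × List Char) c =>
          if c ≠ ' ' then (acc.1, acc.2 ++ [c])
          else (acc.1 ++ [String.ofList acc.2], []))
        (lst, S)).2] = lst ++ (tokS S cs).map String.ofList := by
  induction cs generalizing lst S with
  | nil => simp [tokS]
  | cons c rest ih =>
    rw [List.foldl_cons]
    by_cases hc : c = ' '
    · rw [if_neg (by simp [hc])]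
      rw [ih]
      simp [tokS, hc]
    · rw [if_pos hc]
      rw [ih]
      simp [tokS, hc]

theorem tokS_no_space (S : List Char) (ds : List Char) (h : ∀ c ∈ ds, c ≠ ' ') :
    tokS S ds = [S ++ ds] := by
  induction ds generalizing S with
  | nil => simp [tokS]
  | cons c rest ih =>
    have hc : c ≠ ' ' := h c (by simp)
    simp only [tokS, if_neg hc]
    rw [ih (S ++ [c]) (fun x hx => h x (by simp [hx]))]
    simp

theorem tokS_split (S pre suf : List Char) (h : ∀ c ∈ pre, c ≠ ' ') :
    tokS S (pre ++ ' ' :: suf) = (S ++ pre) :: tokS [] suf := by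
  induction pre generalizing S with
  | nil => simp [tokS]
  | cons c rest ih =>
    have hc : c ≠ ' ' := h c (by simp)
    simp only [List.cons_append, tokS, if_neg hc]
    rw [ih (S ++ [c]) (fun x hx => h x (by simp [hx]))]
    simp

theorem space_prefix_drop (ds : List Char) (i : Nat) :
    [' '] <+: ds.drop i ↔ ds[i]? = some ' ' := by
  constructor
  · rintro ⟨t, ht⟩
    have hh : (ds.drop i).head? = some ' ' := by rw [← ht]; rfl
    rwa [List.head?_drop] at hh
  · intro h
    have hh : (ds.drop i).head? = some ' ' := by rwa [List.head?_drop]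
    cases hd : ds.drop i with
    | nil => rw [hd] at hh; simp at hh
    | cons x t =>
      rw [hd] at hh
      simp at hh
      refine ⟨t, ?_⟩
      subst hh
      simp

theorem Split1Aux_eq (cs : List Char) (fuel start : Nat) (hstart : start ≤ cs.length)
    (hfuel : cs.length + 1 ≤ fuel + start) :
    Split1Aux fuel cs start = (tokS [] (cs.drop start)).map String.ofList := by
  induction fuel generalizing start with
  | zero => exfalso; omega
  | succ fuel ihf =>
    rw [Split1Aux]
    by_cases hpos : PySem.Chars.findFrom cs [' '] (start : Int) none = -1
    · rw [if_pos hpos, PySem.List.slice_from_natCast]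
      by_cases hk : start ≤ cs.length
      · have hf : PySem.Chars.find (cs.drop start) [' '] = -1 := by
          rw [PySem.Chars.findFrom_natCast cs [' '] start hk] at hpos
          split_ifs at hpos with hf
          · exact hf
          · have := PySem.Chars.neg_one_le_find (cs.drop start) [' ']
            omega
        have hnosp : ∀ c ∈ cs.drop start, c ≠ ' ' := by
          intro c hc hceq
          subst hceq
          obtain ⟨s, t, hst⟩ := List.append_of_mem hc
          exact (PySem.Chars.find_eq_neg_one_iff _ _).mp hf ⟨s, t, by rw [hst]; simp⟩
        rw [tokS_no_space [] _ hnosp]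
        simp
      · rw [List.drop_eq_nil_of_le (by omega)]
        simp [tokS]
    · rw [if_neg hpos]
      have hbd := Split1_findFrom_bounds cs start hpos
      have ih : Split1Aux fuel cs ((PySem.Chars.findFrom cs [' '] (start : Int) none).toNat + 1)
          = (tokS [] (cs.drop ((PySem.Chars.findFrom cs [' '] (start : Int) none).toNat + 1))).map
              String.ofList :=
        ihf ((PySem.Chars.findFrom cs [' '] (start : Int) none).toNat + 1) (by omega) (by omega)
      have hk : start ≤ cs.length := hstart
      set ds := cs.drop start with hds
      have hfne : PySem.Chars.find ds [' '] ≠ -1 := by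
        intro hf
        apply hpos
        rw [PySem.Chars.findFrom_natCast cs [' '] start hk, ← hds, if_pos hf]
      have hposval : PySem.Chars.findFrom cs [' '] (start : Int) none =
          (start : Int) + PySem.Chars.find ds [' '] := by
        rw [PySem.Chars.findFrom_natCast cs [' '] start hk, ← hds, if_neg hfne]
      have hr0 : 0 ≤ PySem.Chars.find ds [' '] := by
        have := PySem.Chars.neg_one_le_find ds [' ']
        omega
      set r := (PySem.Chars.find ds [' ']).toNat with hrdef
      have hrcast : PySem.Chars.find ds [' '] = (r : Int) := by omega
      have hspec := PySem.Chars.find_spec (s := ds) (sub := [' ']) hr0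
      have hat : ds[r]? = some ' ' := (space_prefix_drop ds r).mp hspec.1
      have hrlen : r < ds.length := (List.getElem?_eq_some_iff.mp hat).1
      have hnopre : ∀ c ∈ ds.take r, c ≠ ' ' := by
        intro c hc hceq
        subst hceq
        obtain ⟨i, hilt, hig⟩ := List.mem_iff_getElem.mp hc
        have hil : i < r := by
          have h2 := hilt
          rw [List.length_take] at h2
          omega
        apply hspec.2 i hil
        apply (space_prefix_drop ds i).mpr
        rw [List.getElem?_eq_getElem (by omega)]
        rw [List.getElem_take] at hig
        rw [hig]
      have hdssplit : ds = ds.take r ++ ' ' :: ds.drop (r + 1) := by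
        conv_lhs => rw [← List.take_append_drop r ds]
        congr 1
        rw [List.drop_eq_getElem_cons hrlen]
        congr 1
        exact (List.getElem?_eq_some_iff.mp hat).2
      have hslice : PySem.List.slice cs (some (start : Int))
          (some (PySem.Chars.findFrom cs [' '] (start : Int) none)) = ds.take r := by
        rw [hposval, hrcast]
        have hc : (start : Int) + (r : Int) = ((start + r : Nat) : Int) := by push_cast; ring
        rw [hc, PySem.List.slice_natCast, ← hds]
        congr 1
        omega
      have hpos_toNat : (PySem.Chars.findFrom cs [' '] (start : Int) none).toNat = start + r := by
        rw [hposval, hrcast]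
        omega
      rw [hslice, ih, hpos_toNat]
      have hdrop : cs.drop (start + r + 1) = ds.drop (r + 1) := by
        rw [hds, List.drop_drop]
        congr 1
      rw [hdrop]
      conv_rhs => rw [hdssplit]
      rw [tokS_split [] _ _ hnopre]
      simp

-- ===== VERDICT (by name: the statement is the Claim_ definition above) =====
theorem Split1_spec : Claim_equal_Split1 := by
  intro s _
  unfold Spec_Split1 Split1 Split1_alt
  rw [Split1Aux_eq _ _ _ (by omega) (by omega)]
  simp only [List.drop_zero]
  exact Split1_foldA (PySem.Chars.strip s.toList) [] []
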